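-- pv_equiv track=rewrite | github.com/blueones/LeetcodePractices | displaytableoffoodordersinarestaurant1418.py | displayTable
-- ===== SOURCE A (Python) =====
-- def displayTable(orders) :
--     #definitely needs improvement.
--     tables = {}
--     food = {}
--     for order in orders:
--
--         tables[order[1]] = None
--
--         food[order[2]] = None
--     food_kinds = len(food)
--     tables_num = len(tables)
--     display_table = [["0" for i in range(food_kinds+1)] for j in range(tables_num+1)]
--     display_table[0][0] = "Table"
--     row_table = 1
--     tables = dict(sorted(tables.items(),key = lambda x:int(x[0])))
--     for table in tables:
--         display_table[row_table][0]= table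
--         tables[table] = row_table
--         row_table+=1
--     column_table = 1
--     food = dict(sorted(food.items(),key = lambda x:x[0]))
--     for food_item in food:
--         display_table[0][column_table]= food_item
--         food[food_item]= column_table
--         column_table +=1
--
--     for order in orders:
--         if display_table[tables[order[1]]][food[order[2]]] == "0":
--             display_table[tables[order[1]]][food[order[2]]]="1"
--         else:
--             display_table[tables[order[1]]][food[order[2]]]=str(int(display_table[tables[order[1]]][food[order[2]]])+1)
--     return display_table
-- ===== SOURCE B (Python) =====
-- def displayTable(orders):
--     # One pass: count (table, food) pairs; dedup ids in first-occurrence order.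
--     cnt = {}
--     for o in orders:
--         k = (o[1], o[2])
--         cnt[k] = cnt.get(k, 0) + 1
--     ts = sorted(dict.fromkeys(o[1] for o in orders), key=int)
--     fs = sorted(dict.fromkeys(o[2] for o in orders))
--     return [["Table"] + fs] + [[t] + [str(cnt.get((t, f), 0)) for f in fs] for t in ts]
-- ===== Notes on version B (the rewrite author's own statement) =====
-- stated objective: simpler
-- what changed: B replaces A's pre-allocated grid that is mutated in place (with each cell count re-parsed from its string on every increment) by one counting pass over orders into a dict keyed by (table, food) pairs, after which the whole table is built directly by comprehension from the sorted table/food id lists.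
import Mathlib
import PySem

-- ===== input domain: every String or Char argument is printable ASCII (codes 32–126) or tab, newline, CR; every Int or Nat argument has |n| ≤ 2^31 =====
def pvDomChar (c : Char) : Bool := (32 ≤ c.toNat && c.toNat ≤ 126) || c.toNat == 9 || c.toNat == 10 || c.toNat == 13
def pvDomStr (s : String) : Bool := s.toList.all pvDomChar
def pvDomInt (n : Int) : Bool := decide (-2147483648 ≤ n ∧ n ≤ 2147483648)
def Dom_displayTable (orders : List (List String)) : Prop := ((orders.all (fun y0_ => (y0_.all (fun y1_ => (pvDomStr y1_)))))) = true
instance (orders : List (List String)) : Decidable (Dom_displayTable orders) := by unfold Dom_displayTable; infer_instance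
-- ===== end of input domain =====

-- B replaces A's in-place grid mutation (whose cell counts are re-parsed from strings on every
-- increment) by one counting pass into a (table, food)-keyed dict, then builds the table directly.

-- ===== PORT A =====

-- display_table[i][j] = v  (all of A's assignments are provably in range, where Python's and this
-- out-of-range behaviours could differ they are never exercised)
def pvSetCell (g : List (List String)) (i j : Nat) (v : String) : List (List String) :=
  g.set i ((g.getD i []).set j v)

-- hand port of the final loop's int(cell): that cell is always a canonical nonnegative decimal
-- numeral (a str(n) the loop itself wrote), on which this plain base-10 fold is exact
def pvParseDec (s : String) : Int :=
  s.toList.foldl (fun a c => 10 * a + ((c.toNat : Int) - 48)) 0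

def displayTable (orders : List (List String)) : List (List String) :=
  -- for order in orders: tables[order[1]] = None; food[order[2]] = None
  let tf := orders.foldl
    (fun (p : PySem.Dict String (Option Nat) × PySem.Dict String (Option Nat)) o =>
      (p.1.insert (PySem.List.pyGetD o 1 "") none, p.2.insert (PySem.List.pyGetD o 2 "") none))
    (PySem.Dict.empty, PySem.Dict.empty)
  let food_kinds := tf.2.size
  let tables_num := tf.1.size
  let g0 := (List.range (tables_num + 1)).map (fun _ => (List.range (food_kinds + 1)).map (fun _ => "0"))
  let g1 := pvSetCell g0 0 0 "Table"
  -- tables = dict(sorted(tables.items(), key=lambda x: int(x[0])));  int() raising is outside Pre_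
  let tsorted := PySem.Dict.ofList (PySem.List.sorted tf.1.items (fun x => (PySem.Int.ofStr? x.1).getD 0) false)
  -- for table in tables: … ; row_table (a nonneg Python int used as list index) is kept as Nat
  let st := tsorted.keys.foldl
    (fun (st : List (List String) × PySem.Dict String (Option Nat) × Nat) t =>
      (pvSetCell st.1 st.2.2 0 t, st.2.1.insert t (some st.2.2), st.2.2 + 1))
    (g1, tsorted, 1)
  let fsorted := PySem.Dict.ofList (PySem.List.sorted tf.2.items (fun x => x.1) false)
  -- for food_item in food: …
  let sf := fsorted.keys.foldl
    (fun (st : List (List String) × PySem.Dict String (Option Nat) × Nat) f =>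
      (pvSetCell st.1 0 st.2.2 f, st.2.1.insert f (some st.2.2), st.2.2 + 1))
    (st.1, fsorted, 1)
  -- for order in orders: increment the cell (reading it back through int())
  orders.foldl
    (fun g o =>
      let r := ((st.2.1.getD (PySem.List.pyGetD o 1 "") none).getD 0)
      let c := ((sf.2.1.getD (PySem.List.pyGetD o 2 "") none).getD 0)
      let cell := (g.getD r []).getD c ""
      if cell == "0" then pvSetCell g r c "1"
      else pvSetCell g r c (PySem.Int.toStr (pvParseDec cell + 1)))
    sf.1

-- ===== PORT B =====
def displayTable_alt (orders : List (List String)) : List (List String) :=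
  let cnt : PySem.Dict (String × String) Int := orders.foldl
    (fun d o =>
      let k := (PySem.List.pyGetD o 1 "", PySem.List.pyGetD o 2 "")
      d.insert k (d.getD k 0 + 1))
    PySem.Dict.empty
  let ts := PySem.List.sorted (PySem.List.dedup (orders.map (fun o => PySem.List.pyGetD o 1 "")))
    (fun t => (PySem.Int.ofStr? t).getD 0) false
  let fs := PySem.List.sorted (PySem.List.dedup (orders.map (fun o => PySem.List.pyGetD o 2 "")))
    (fun f => f) false
  (["Table"] ++ fs) :: ts.map (fun t => [t] ++ fs.map (fun f => PySem.Int.toStr (cnt.getD (t, f) 0)))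

-- ===== PRECONDITION & SPEC =====
-- exactly where the Python A returns: every order needs entries at indices 1 and 2 (else
-- IndexError) and a table id accepted by int() (else ValueError in the sort key)
def Pre_displayTable (orders : List (List String)) : Prop :=
  ∀ o ∈ orders, 3 ≤ o.length ∧ (PySem.Int.ofStr? (PySem.List.pyGetD o 1 "")).isSome = true
instance (orders : List (List String)) : Decidable (Pre_displayTable orders) := by
  unfold Pre_displayTable; infer_instance
def pvWitness_displayTable : List (List String) := [["u", "3", "apple"], ["v", " 3 ", "beer"], ["u", "3", "apple"]]
def Spec_displayTable (orders : List (List String)) (out : List (List String)) : Prop := out = displayTable_alt orders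
instance (orders : List (List String)) (out : List (List String)) : Decidable (Spec_displayTable orders out) := by unfold Spec_displayTable; infer_instance

-- ===== CLAIM (what is proved, stated in full; the proofs are below) =====
def Claim_equal_displayTable : Prop := ∀ (orders : List (List String)), Dom_displayTable orders → Pre_displayTable orders → Spec_displayTable orders (displayTable orders)

-- ===== LEMMAS AND PROOFS =====

-- proof-only abbreviations
def pvGrid (ts fs : List String) (c : String → String → Int) : List (List String) :=
  ("Table" :: fs) :: ts.map (fun t => t :: fs.map (fun f => PySem.Int.toStr (c t f)))
def pvTs (orders : List (List String)) : List String :=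
  PySem.List.sorted (PySem.List.dedup (orders.map (fun o => PySem.List.pyGetD o 1 "")))
    (fun t => (PySem.Int.ofStr? t).getD 0) false
def pvFs (orders : List (List String)) : List String :=
  PySem.List.sorted (PySem.List.dedup (orders.map (fun o => PySem.List.pyGetD o 2 "")))
    (fun f => f) false
def pvCount (orders : List (List String)) (t f : String) : Int :=
  (orders.countP (fun o => (PySem.List.pyGetD o 1 "", PySem.List.pyGetD o 2 "") == (t, f)) : Int)


-- ---- Nat.toDigits structure and the decimal round trip ----

theorem pv_toDigitsCore_succ (b f n : Nat) (l : List Char) :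
    Nat.toDigitsCore b (f + 1) n l =
      if n / b = 0 then (n % b).digitChar :: l
      else Nat.toDigitsCore b f (n / b) ((n % b).digitChar :: l) := by
  simp only [Nat.toDigitsCore]

theorem pv_toDigitsCore_append (b : Nat) : ∀ (f n : Nat) (l : List Char),
    Nat.toDigitsCore b f n l = Nat.toDigitsCore b f n [] ++ l := by
  intro f
  induction f with
  | zero => intro n l; simp [Nat.toDigitsCore]
  | succ f ih =>
    intro n l
    rw [pv_toDigitsCore_succ, pv_toDigitsCore_succ]
    by_cases h : n / b = 0
    · simp [h]
    · simp only [h, if_false]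
      rw [ih (n / b) ((n % b).digitChar :: l), ih (n / b) [(n % b).digitChar]]
      simp

theorem pv_toDigitsCore_fuel (b : Nat) (hb : 2 ≤ b) : ∀ (n f f' : Nat), n < f → n < f' →
    Nat.toDigitsCore b f n [] = Nat.toDigitsCore b f' n [] := by
  intro n
  induction n using Nat.strong_induction_on with
  | _ n ih =>
    intro f f' hf hf'
    obtain ⟨g, rfl⟩ : ∃ g, f = g + 1 := ⟨f - 1, by omega⟩
    obtain ⟨g', rfl⟩ : ∃ g', f' = g' + 1 := ⟨f' - 1, by omega⟩
    rw [pv_toDigitsCore_succ, pv_toDigitsCore_succ]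
    by_cases h : n / b = 0
    · simp [h]
    · simp only [h, if_false]
      rw [pv_toDigitsCore_append b g, pv_toDigitsCore_append b g']
      have hn : 0 < n := Nat.pos_of_ne_zero (fun hh => h (by simp [hh]))
      have hlt : n / b < n := Nat.div_lt_self hn (by omega)
      have h1 : n / b < g := by omega
      have h2 : n / b < g' := by omega
      rw [ih (n / b) hlt g g' h1 h2]

theorem pv_toDigits_lt (m : Nat) (h : m < 10) : Nat.toDigits 10 m = [Nat.digitChar m] := by
  have h1 : m / 10 = 0 := Nat.div_eq_of_lt h
  have h2 : m % 10 = m := Nat.mod_eq_of_lt h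
  simp only [Nat.toDigits]
  rw [pv_toDigitsCore_succ]
  simp [h1, h2]

theorem pv_toDigits_ge (m : Nat) (h : 10 ≤ m) :
    Nat.toDigits 10 m = Nat.toDigits 10 (m / 10) ++ [Nat.digitChar (m % 10)] := by
  have h0 : ¬ (m / 10 = 0) := by
    intro hh
    have := Nat.div_le_div_right (c := 10) h
    omega
  simp only [Nat.toDigits]
  rw [pv_toDigitsCore_succ]
  simp only [h0, if_false]
  rw [pv_toDigitsCore_append 10 m]
  rw [pv_toDigitsCore_fuel 10 (by omega) (m / 10) m (m / 10 + 1)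
    (Nat.div_lt_self (by omega) (by omega)) (by omega)]

def pvParseChars (cs : List Char) : Int :=
  cs.foldl (fun a c => 10 * a + ((c.toNat : Int) - 48)) 0

theorem pv_parse_toDigits (m : Nat) : pvParseChars (Nat.toDigits 10 m) = (m : Int) := by
  induction m using Nat.strong_induction_on with
  | _ m ih =>
    by_cases h : m < 10
    · rw [pv_toDigits_lt m h]
      interval_cases m <;> decide
    · rw [Nat.not_lt] at h
      rw [pv_toDigits_ge m h]
      have hd : (Nat.digitChar (m % 10)).toNat = m % 10 + 48 := by
        have : m % 10 < 10 := Nat.mod_lt _ (by omega)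
        interval_cases hm : m % 10 <;> decide
      have hrec := ih (m / 10) (Nat.div_lt_self (by omega) (by omega))
      simp only [pvParseChars, List.foldl_append, List.foldl_cons, List.foldl_nil] at *
      rw [hrec, hd]
      push_cast
      omega

theorem pv_parse_toStr (n : Int) (h : 0 ≤ n) : pvParseDec (PySem.Int.toStr n) = n := by
  have h1 : pvParseDec (PySem.Int.toStr n) = pvParseChars (PySem.Int.toStr n).toList := rfl
  rw [h1, PySem.Int.toList_toStr]
  unfold PySem.Int.toChars
  rw [if_neg (by omega)]
  rw [pv_parse_toDigits n.toNat]
  omega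

theorem pv_toStr_inj (m n : Int) (hm : 0 ≤ m) (hn : 0 ≤ n)
    (h : PySem.Int.toStr m = PySem.Int.toStr n) : m = n := by
  have h2 := pv_parse_toStr m hm
  rw [h, pv_parse_toStr n hn] at h2
  omega

theorem pv_toStr_eq_zero_iff (n : Int) (h : 0 ≤ n) : PySem.Int.toStr n = "0" ↔ n = 0 := by
  constructor
  · intro hh
    have : PySem.Int.toStr n = PySem.Int.toStr 0 := by rw [hh]; rfl
    exact pv_toStr_inj n 0 h (by norm_num) this
  · intro hh; subst hh; rfl

-- ---- stability: a sort whose key factors through a map commutes with the map ----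

theorem pv_map_insertBy {α β : Type} (f : α → β) (bef : β → β → Bool)
    (x : α) : ∀ (l : List α),
    (PySem.List.insertBy (fun a b => bef (f a) (f b)) x l).map f
      = PySem.List.insertBy bef (f x) (l.map f) := by
  intro l
  induction l with
  | nil => simp [PySem.List.insertBy]
  | cons y ys ih =>
    simp only [PySem.List.insertBy, List.map_cons]
    by_cases h : bef (f x) (f y)
    · simp [h]
    · simp only [h, if_false, Bool.false_eq_true]
      simp [ih]

theorem pv_map_sorted {α β κ : Type} (f : α → β) (k : β → κ) [LT κ] [DecidableLT κ]
    (xs : List α) :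
    (PySem.List.sorted xs (fun a => k (f a)) false).map f
      = PySem.List.sorted (xs.map f) k false := by
  rw [PySem.List.sorted_eq_foldl_insertBy, PySem.List.sorted_eq_foldl_insertBy, List.foldl_map]
  suffices h : ∀ (acc : List α),
      (xs.foldl (fun acc x => PySem.List.insertBy (fun a b => decide (k (f a) < k (f b))) x acc) acc).map f
        = xs.foldl (fun acc x => PySem.List.insertBy (fun a b => decide (k a < k b)) (f x) acc) (acc.map f) by
    exact h []
  induction xs with
  | nil => simp
  | cons y ys ih =>
    intro acc
    simp only [List.foldl_cons]
    rw [ih, pv_map_insertBy f (fun a b => decide (k a < k b))]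

-- ---- small list facts ----

theorem pv_getD_append_len {α : Type} (xs ys : List α) (y : α) (d : α) :
    (xs ++ y :: ys).getD xs.length d = y := by
  induction xs with
  | nil => rfl
  | cons a l ih => simp

theorem pv_set_append_len {α : Type} (xs ys : List α) (y v : α) :
    (xs ++ y :: ys).set xs.length v = xs ++ v :: ys := by
  rw [List.set_append]; simp

theorem pv_map_const_replicate {α β : Type} (x : β) : ∀ (l : List α),
    l.map (fun _ => x) = List.replicate l.length x := by
  intro l
  induction l with
  | nil => rfl
  | cons a l ih => simp [ih, List.replicate_succ]

theorem pv_zip_replicate {α : Type} : ∀ (l : List α) (row : List α),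
    (l.zip (List.replicate l.length row)).map (fun p => p.2.set 0 p.1)
      = l.map (fun t => row.set 0 t) := by
  intro l
  induction l with
  | nil => intro row; rfl
  | cons t l ih => intro row; simp [List.replicate_succ, ih]

theorem pv_set_map_idxOf {α β : Type} [DecidableEq α] (g : α → β) (v : β) :
    ∀ (l : List α), l.Nodup → ∀ x ∈ l,
    (l.map g).set (l.idxOf x) v = l.map (fun y => if y = x then v else g y) := by
  intro l
  induction l with
  | nil => intro _ x hx; simp at hx
  | cons a l ih =>
    intro hnd x hx
    rcases List.mem_cons.mp hx with rfl | hx'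
    · simp only [List.idxOf_cons_self, List.map_cons, List.set_cons_zero]
      have ha : x ∉ l := (List.nodup_cons.mp hnd).1
      rw [if_pos trivial]
      congr 1
      exact (List.map_congr_left (fun y hy => by
        have : ¬ (y = x) := fun h => ha (h ▸ hy)
        simp [this])).symm
    · have ha : a ∉ l := (List.nodup_cons.mp hnd).1
      have hax : ¬ (a = x) := fun h => ha (h ▸ hx')
      rw [List.idxOf_cons_ne _ (fun h => hax h)]
      simp only [List.map_cons, List.set_cons_succ]
      rw [ih (List.nodup_cons.mp hnd).2 x hx']
      simp [hax]

-- the row loop: writes l's elements into column 0 of successive rows, recording row numbers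
theorem pv_rowLoop :
    ∀ (l : List String) (hdr todo : List (List String)) (d : PySem.Dict String (Option Nat)) (r : Nat),
    l.length = todo.length → r = hdr.length →
    l.foldl (fun (st : List (List String) × PySem.Dict String (Option Nat) × Nat) t =>
        (pvSetCell st.1 st.2.2 0 t, st.2.1.insert t (some st.2.2), st.2.2 + 1))
      (hdr ++ todo, d, r)
    = (hdr ++ (l.zip todo).map (fun p => p.2.set 0 p.1),
       l.foldl (fun (p : PySem.Dict String (Option Nat) × Nat) t =>
         (p.1.insert t (some p.2), p.2 + 1)) (d, r)) := by
  intro l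
  induction l with
  | nil =>
    intro hdr todo d r h hr
    have : todo = [] := List.eq_nil_of_length_eq_zero h.symm
    subst this; simp
  | cons t l ih =>
    intro hdr todo d r h hr
    subst hr
    cases todo with
    | nil => simp at h
    | cons row todo' =>
      simp only [List.foldl_cons]
      have hset : pvSetCell (hdr ++ row :: todo') hdr.length 0 t
          = (hdr ++ [row.set 0 t]) ++ todo' := by
        unfold pvSetCell
        rw [pv_getD_append_len, pv_set_append_len]
        simp
      rw [hset]
      have hlen : hdr.length + 1 = (hdr ++ [row.set 0 t]).length := by simp
      rw [hlen, ih (hdr ++ [row.set 0 t]) todo' _ _ (by simpa using h) rfl]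
      simp

-- the column loop: writes l's elements into successive columns of row 0
theorem pv_colLoop :
    ∀ (l todo pre : List String) (rows : List (List String)) (d : PySem.Dict String (Option Nat)) (r : Nat),
    l.length = todo.length → r = pre.length →
    l.foldl (fun (st : List (List String) × PySem.Dict String (Option Nat) × Nat) f =>
        (pvSetCell st.1 0 st.2.2 f, st.2.1.insert f (some st.2.2), st.2.2 + 1))
      ((pre ++ todo) :: rows, d, r)
    = ((pre ++ l) :: rows,
       l.foldl (fun (p : PySem.Dict String (Option Nat) × Nat) f =>
         (p.1.insert f (some p.2), p.2 + 1)) (d, r)) := by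
  intro l
  induction l with
  | nil =>
    intro todo pre rows d r h hr
    have : todo = [] := List.eq_nil_of_length_eq_zero h.symm
    subst this; simp
  | cons f l ih =>
    intro todo pre rows d r h hr
    subst hr
    cases todo with
    | nil => simp at h
    | cons y todo' =>
      simp only [List.foldl_cons]
      have hset : pvSetCell ((pre ++ y :: todo') :: rows) 0 pre.length f
          = (((pre ++ [f]) ++ todo') :: rows) := by
        unfold pvSetCell
        simp only [List.getD_cons_zero, List.set_cons_zero]
        rw [pv_set_append_len]
        simp
      rw [hset]
      have hlen : pre.length + 1 = (pre ++ [f]).length := by simp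
      rw [hlen, ih todo' (pre ++ [f]) rows _ _ (by simpa using h) rfl]
      simp

-- final dict of a row/column loop
theorem pv_dictFold_getD_not_mem (t : String) :
    ∀ (l : List String) (d : PySem.Dict String (Option Nat)) (r : Nat), t ∉ l →
    ((l.foldl (fun (p : PySem.Dict String (Option Nat) × Nat) x =>
        (p.1.insert x (some p.2), p.2 + 1)) (d, r)).1).getD t none = d.getD t none := by
  intro l
  induction l with
  | nil => intro d r _; rfl
  | cons x l ih =>
    intro d r ht
    simp only [List.foldl_cons]
    rw [ih _ _ (fun h => ht (List.mem_cons_of_mem _ h))]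
    exact PySem.Dict.getD_insert_of_ne d _ _ (fun h => ht (h ▸ List.mem_cons_self))

theorem pv_dictFold_getD (t : String) :
    ∀ (l : List String) (d : PySem.Dict String (Option Nat)) (r : Nat), l.Nodup → t ∈ l →
    ((l.foldl (fun (p : PySem.Dict String (Option Nat) × Nat) x =>
        (p.1.insert x (some p.2), p.2 + 1)) (d, r)).1).getD t none = some (r + l.idxOf t) := by
  intro l
  induction l with
  | nil => intro _ _ _ h; simp at h
  | cons x l ih =>
    intro d r hnd ht
    rcases List.mem_cons.mp ht with rfl | ht'
    · simp only [List.foldl_cons, List.idxOf_cons_self]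
      rw [pv_dictFold_getD_not_mem t l _ _ (List.nodup_cons.mp hnd).1]
      rw [PySem.Dict.getD_insert_self]
      simp
    · have hx : x ∉ l := (List.nodup_cons.mp hnd).1
      have hxt : ¬ (x = t) := fun h => hx (h ▸ ht')
      simp only [List.foldl_cons]
      rw [ih _ _ (List.nodup_cons.mp hnd).2 ht']
      rw [List.idxOf_cons_ne _ (fun h => hxt h)]
      congr 1; omega

theorem pv_countLoop (ts fs : List String) (td fd : PySem.Dict String (Option Nat))
    (hts : ts.Nodup) (hfs : fs.Nodup)
    (htd : ∀ t ∈ ts, td.getD t none = some (1 + ts.idxOf t))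
    (hfd : ∀ f ∈ fs, fd.getD f none = some (1 + fs.idxOf f)) :
    ∀ (os : List (List String)) (c : String → String → Int),
    (∀ t f, 0 ≤ c t f) →
    (∀ o ∈ os, PySem.List.pyGetD o 1 "" ∈ ts ∧ PySem.List.pyGetD o 2 "" ∈ fs) →
    os.foldl (fun g o =>
        let r := ((td.getD (PySem.List.pyGetD o 1 "") none).getD 0)
        let c := ((fd.getD (PySem.List.pyGetD o 2 "") none).getD 0)
        let cell := (g.getD r []).getD c ""
        if cell == "0" then pvSetCell g r c "1"
        else pvSetCell g r c (PySem.Int.toStr (pvParseDec cell + 1)))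
      (pvGrid ts fs c)
    = pvGrid ts fs (fun t f => c t f
        + (os.countP (fun o => (PySem.List.pyGetD o 1 "", PySem.List.pyGetD o 2 "") == (t, f)) : Int)) := by
  intro os
  induction os with
  | nil =>
    intro c hc hmem
    simp
  | cons o os ih =>
    intro c hc hmem
    obtain ⟨ht0, hf0⟩ := hmem o List.mem_cons_self
    set t0 := PySem.List.pyGetD o 1 "" with hdef_t0
    set f0 := PySem.List.pyGetD o 2 "" with hdef_f0
    have hi : ts.idxOf t0 < ts.length := List.idxOf_lt_length_of_mem ht0
    have hj : fs.idxOf f0 < fs.length := List.idxOf_lt_length_of_mem hf0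
    simp only [List.foldl_cons]
    rw [htd t0 ht0, hfd f0 hf0]
    have hrow : (pvGrid ts fs c).getD ((some (1 + ts.idxOf t0)).getD 0) []
        = t0 :: fs.map (fun f => PySem.Int.toStr (c t0 f)) := by
      simp only [Option.getD_some, pvGrid, Nat.add_comm 1 (ts.idxOf t0), List.getD_cons_succ]
      rw [List.getD_eq_getElem _ _ (by simpa using hi), List.getElem_map, List.getElem_idxOf hi]
    have hcell : ((t0 :: fs.map (fun f => PySem.Int.toStr (c t0 f))).getD
          ((some (1 + fs.idxOf f0)).getD 0) "") = PySem.Int.toStr (c t0 f0) := by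
      simp only [Option.getD_some, Nat.add_comm 1 (fs.idxOf f0), List.getD_cons_succ]
      rw [List.getD_eq_getElem _ _ (by simpa using hj), List.getElem_map, List.getElem_idxOf hj]
    have hwrite : ∀ v : String, v = PySem.Int.toStr (c t0 f0 + 1) →
        pvSetCell (pvGrid ts fs c) ((some (1 + ts.idxOf t0)).getD 0)
            ((some (1 + fs.idxOf f0)).getD 0) v
        = pvGrid ts fs (fun t f => if t = t0 ∧ f = f0 then c t0 f0 + 1 else c t f) := by
      intro v hv
      unfold pvSetCell
      rw [hrow]
      simp only [Option.getD_some, Nat.add_comm 1 (fs.idxOf f0), Nat.add_comm 1 (ts.idxOf t0),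
        List.set_cons_succ, pvGrid]
      rw [pv_set_map_idxOf _ _ fs hfs f0 hf0]
      rw [pv_set_map_idxOf _ _ ts hts t0 ht0]
      congr 1
      apply List.map_congr_left
      intro t htmem
      by_cases h : t = t0
      · subst h
        simp only [if_true, List.cons.injEq, true_and]
        apply List.map_congr_left
        intro f hfmem
        by_cases h2 : f = f0
        · subst h2
          simp [hv]
        · simp [h2]
      · simp only [if_neg h, List.cons.injEq, true_and]
        apply List.map_congr_left
        intro f hfmem
        have : ¬ (t = t0 ∧ f = f0) := fun hh => h hh.1
        simp [this]
    have hmem' : ∀ o ∈ os, PySem.List.pyGetD o 1 "" ∈ ts ∧ PySem.List.pyGetD o 2 "" ∈ fs :=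
      fun o ho => hmem o (List.mem_cons_of_mem _ ho)
    have hc1 : ∀ t f, 0 ≤ (fun t f => if t = t0 ∧ f = f0 then c t0 f0 + 1 else c t f) t f := by
      intro t f
      by_cases h : t = t0 ∧ f = f0
      · simp only [if_pos h]
        have := hc t0 f0; omega
      · simp only [if_neg h]
        exact hc t f
    rw [hrow, hcell]
    by_cases hzero : c t0 f0 = 0
    · have : (PySem.Int.toStr (c t0 f0) == "0") = true := by
        rw [beq_iff_eq, pv_toStr_eq_zero_iff _ (hc t0 f0)]; exact hzero
      rw [if_pos this]
      rw [hwrite "1" (by rw [hzero]; rfl)]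
      rw [ih _ hc1 hmem']
      congr 1
      funext t f
      by_cases h : t = t0 ∧ f = f0
      · obtain ⟨rfl, rfl⟩ := h
        have hcond : t0 = t0 ∧ f0 = f0 := ⟨rfl, rfl⟩
        rw [if_pos hcond, List.countP_cons, ← hdef_t0, ← hdef_f0]
        simp only [beq_self_eq_true, if_true]
        push_cast
        omega
      · rw [if_neg h, List.countP_cons, ← hdef_t0, ← hdef_f0]
        simp only [beq_iff_eq]
        rw [if_neg (fun hh => h ⟨(Prod.mk.injEq _ _ _ _ ▸ hh).1.symm, (Prod.mk.injEq _ _ _ _ ▸ hh).2.symm⟩)]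
        simp
    · have : (PySem.Int.toStr (c t0 f0) == "0") = false := by
        rw [beq_eq_false_iff_ne]
        intro hh
        exact hzero ((pv_toStr_eq_zero_iff _ (hc t0 f0)).mp hh)
      rw [if_neg (by simp [this])]
      rw [hwrite _ (by rw [pv_parse_toStr _ (hc t0 f0)])]
      rw [ih _ hc1 hmem']
      congr 1
      funext t f
      by_cases h : t = t0 ∧ f = f0
      · obtain ⟨rfl, rfl⟩ := h
        have hcond : t0 = t0 ∧ f0 = f0 := ⟨rfl, rfl⟩
        rw [if_pos hcond, List.countP_cons, ← hdef_t0, ← hdef_f0]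
        simp only [beq_self_eq_true, if_true]
        push_cast
        omega
      · rw [if_neg h, List.countP_cons, ← hdef_t0, ← hdef_f0]
        simp only [beq_iff_eq]
        rw [if_neg (fun hh => h ⟨(Prod.mk.injEq _ _ _ _ ▸ hh).1.symm, (Prod.mk.injEq _ _ _ _ ▸ hh).2.symm⟩)]
        simp


theorem pv_B_eq (orders : List (List String)) :
    displayTable_alt orders = pvGrid (pvTs orders) (pvFs orders)
      (fun t f => 0 + pvCount orders t f) := by
  simp only [displayTable_alt]
  rw [← List.foldl_map (f := fun o => (PySem.List.pyGetD o 1 "", PySem.List.pyGetD o 2 ""))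
    (g := fun (d : PySem.Dict (String × String) Int) k => d.insert k (d.getD k 0 + 1))]
  simp only [PySem.Dict.getD_foldl_insert_add_one, PySem.Dict.getD_empty]
  simp only [List.count_eq_countP, List.countP_map, Function.comp_def]
  unfold pvGrid pvTs pvFs pvCount
  simp

theorem pv_A_eq (orders : List (List String)) :
    displayTable orders = pvGrid (pvTs orders) (pvFs orders)
      (fun t f => 0 + pvCount orders t f) := by
  simp only [displayTable]
  rw [PySem.List.foldl_prod_mk
    (f := fun (d : PySem.Dict String (Option Nat)) (o : List String) => d.insert (PySem.List.pyGetD o 1 "") none)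
    (g := fun (d : PySem.Dict String (Option Nat)) (o : List String) => d.insert (PySem.List.pyGetD o 2 "") none)]
  set dT := orders.foldl (fun (d : PySem.Dict String (Option Nat)) o => d.insert (PySem.List.pyGetD o 1 "") none) PySem.Dict.empty with hdT
  set dF := orders.foldl (fun (d : PySem.Dict String (Option Nat)) o => d.insert (PySem.List.pyGetD o 2 "") none) PySem.Dict.empty with hdF
  -- the keys of the two collecting dicts are the deduplicated id lists
  have hkT : dT.keys = PySem.List.dedup (orders.map (fun o => PySem.List.pyGetD o 1 "")) := by
    rw [hdT, PySem.Dict.keys_foldl_insert_key, PySem.List.dedup_eq_ofList]; rfl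
  have hkF : dF.keys = PySem.List.dedup (orders.map (fun o => PySem.List.pyGetD o 2 "")) := by
    rw [hdF, PySem.Dict.keys_foldl_insert_key, PySem.List.dedup_eq_ofList]; rfl
  have hndT : dT.keys.Nodup := by
    rw [hdT]; exact PySem.Dict.nodup_keys_foldl_insert_key _ _ _ _ PySem.Dict.nodup_keys_empty
  have hndF : dF.keys.Nodup := by
    rw [hdF]; exact PySem.Dict.nodup_keys_foldl_insert_key _ _ _ _ PySem.Dict.nodup_keys_empty
  have hndTs : (pvTs orders).Nodup := by
    refine ((PySem.List.sorted_perm _ _ _).nodup_iff).mpr ?_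
    rw [← hkT]; exact hndT
  have hndFs : (pvFs orders).Nodup := by
    refine ((PySem.List.sorted_perm _ _ _).nodup_iff).mpr ?_
    rw [← hkF]; exact hndF
  -- projecting the sorted items lists to their keys
  have hitemsT : (PySem.List.sorted dT.items (fun x => (PySem.Int.ofStr? x.1).getD 0) false).map
      (fun (x : String × Option Nat) => x.1) = pvTs orders := by
    rw [pv_map_sorted (fun (x : String × Option Nat) => x.1) (fun t => (PySem.Int.ofStr? t).getD 0)]
    rw [show dT.items.map (fun (x : String × Option Nat) => x.1) = dT.keys from rfl, hkT]
    rfl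
  have hitemsF : (PySem.List.sorted dF.items (fun x => x.1) false).map
      (fun (x : String × Option Nat) => x.1) = pvFs orders := by
    rw [pv_map_sorted (fun (x : String × Option Nat) => x.1) (fun f => f)]
    rw [show dF.items.map (fun (x : String × Option Nat) => x.1) = dF.keys from rfl, hkF]
    rfl
  have htsk : (PySem.Dict.ofList (PySem.List.sorted dT.items
      (fun x => (PySem.Int.ofStr? x.1).getD 0) false)).keys = pvTs orders := by
    simp only [PySem.Dict.ofList, PySem.Dict.update]
    rw [PySem.Dict.keys_foldl_insert_key]
    rw [show (PySem.Dict.empty : PySem.Dict String (Option Nat)).keys = ([] : List String) from rfl]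
    rw [show ∀ l : List String, PySem.Set.update ([] : List String) l = PySem.Set.ofList l from fun _ => rfl]
    rw [hitemsT]
    exact PySem.Set.ofList_eq_self_of_nodup _ hndTs
  have hfsk : (PySem.Dict.ofList (PySem.List.sorted dF.items
      (fun x => x.1) false)).keys = pvFs orders := by
    simp only [PySem.Dict.ofList, PySem.Dict.update]
    rw [PySem.Dict.keys_foldl_insert_key]
    rw [show (PySem.Dict.empty : PySem.Dict String (Option Nat)).keys = ([] : List String) from rfl]
    rw [show ∀ l : List String, PySem.Set.update ([] : List String) l = PySem.Set.ofList l from fun _ => rfl]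
    rw [hitemsF]
    exact PySem.Set.ofList_eq_self_of_nodup _ hndFs
  -- sizes
  have hsT : dT.size = (pvTs orders).length := by
    have h1 : dT.size = dT.keys.length := by
      simp [PySem.Dict.size, PySem.Dict.keys]
    rw [h1, hkT]
    simp [pvTs, PySem.List.length_sorted]
  have hsF : dF.size = (pvFs orders).length := by
    have h1 : dF.size = dF.keys.length := by
      simp [PySem.Dict.size, PySem.Dict.keys]
    rw [h1, hkF]
    simp [pvFs, PySem.List.length_sorted]
  rw [htsk, hfsk, hsT, hsF]
  dsimp only
  -- the freshly allocated grid, after writing "Table"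
  have hg1 : pvSetCell ((List.range ((pvTs orders).length + 1)).map
        (fun _ => (List.range ((pvFs orders).length + 1)).map (fun _ => "0"))) 0 0 "Table"
      = ["Table" :: List.replicate (pvFs orders).length "0"]
        ++ List.replicate (pvTs orders).length ("0" :: List.replicate (pvFs orders).length "0") := by
    rw [pv_map_const_replicate, pv_map_const_replicate]
    simp only [List.length_range, List.replicate_succ]
    simp [pvSetCell]
  rw [hg1]
  rw [pv_rowLoop (pvTs orders) _ _ _ 1 (by simp) (by simp)]
  dsimp only
  rw [pv_zip_replicate]
  simp only [List.set_cons_zero, List.singleton_append]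
  rw [show ("Table" :: List.replicate (pvFs orders).length "0" : List String)
      = ["Table"] ++ List.replicate (pvFs orders).length "0" from rfl]
  rw [pv_colLoop (pvFs orders) _ _ _ _ 1 (by simp) (by simp)]
  dsimp only
  have hg : pvGrid (pvTs orders) (pvFs orders) (fun _ _ => (0 : Int))
      = (["Table"] ++ pvFs orders)
        :: (pvTs orders).map (fun t => t :: List.replicate (pvFs orders).length "0") := by
    simp [pvGrid, show PySem.Int.toStr 0 = "0" from rfl, pv_map_const_replicate (x := "0")]
  rw [← hg]
  have hmem : ∀ o ∈ orders, PySem.List.pyGetD o 1 "" ∈ pvTs orders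
      ∧ PySem.List.pyGetD o 2 "" ∈ pvFs orders := by
    intro o ho
    constructor
    · unfold pvTs
      rw [PySem.List.mem_sorted, PySem.List.mem_dedup]
      exact List.mem_map_of_mem ho
    · unfold pvFs
      rw [PySem.List.mem_sorted, PySem.List.mem_dedup]
      exact List.mem_map_of_mem ho
  rw [pv_countLoop (pvTs orders) (pvFs orders) _ _ hndTs hndFs
      (fun t ht => pv_dictFold_getD t (pvTs orders) _ 1 hndTs ht)
      (fun f hf => pv_dictFold_getD f (pvFs orders) _ 1 hndFs hf)
      orders (fun _ _ => 0) (fun _ _ => le_refl 0) hmem]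
  simp [pvCount]

-- ===== VERDICT (by name: the statement is the Claim_ definition above) =====
theorem displayTable_spec : Claim_equal_displayTable := by
  intro orders _ _
  unfold Spec_displayTable
  rw [pv_A_eq, pv_B_eq]
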